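-- pv_equiv track=rewrite | github.com/KuramitsuLab/kogitune | kogitune/filters/markdown.py | split_by_line
-- ===== SOURCE A (Python) =====
-- def split_by_line(text, max_length, dots='...'):
--     lines = text.split('\n')
--     ss=[]
--     length_count = 0
--     for line in lines:
--         length_count += len(line)
--         if length_count > max_length:
--             ss.append(dots)
--             break
--         ss.append(line)
--     ss.extend(lines[-1:])
--     return '\n'.join(ss)
-- ===== SOURCE B (Python) =====
-- def split_by_line(text, max_length, dots='...'):
--     lines = text.split('\n')
--     # stage 1: prefix sums of line lengths (nondecreasing, lengths >= 0)
--     cums = []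
--     total = 0
--     for line in lines:
--         total += len(line)
--         cums.append(total)
--     # stage 2: binary search for the first index whose prefix sum exceeds max_length
--     lo, hi = 0, len(lines)
--     while lo < hi:
--         mid = (lo + hi) // 2
--         if cums[mid] > max_length:
--             hi = mid
--         else:
--             lo = mid + 1
--     body = lines if lo == len(lines) else lines[:lo] + [dots]
--     return '\n'.join(body + lines[-1:])
-- ===== Notes on version B (the rewrite author's own statement) =====
-- stated objective: alternative
-- what changed: B replaces A's single cumulative scan-with-break by two stages: it builds the prefix-sum list of line lengths and then binary-searches it (exploiting that prefix sums of nonnegative lengths are nondecreasing) for the first index exceeding max_length, assembling the result by slicing.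
import Mathlib
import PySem

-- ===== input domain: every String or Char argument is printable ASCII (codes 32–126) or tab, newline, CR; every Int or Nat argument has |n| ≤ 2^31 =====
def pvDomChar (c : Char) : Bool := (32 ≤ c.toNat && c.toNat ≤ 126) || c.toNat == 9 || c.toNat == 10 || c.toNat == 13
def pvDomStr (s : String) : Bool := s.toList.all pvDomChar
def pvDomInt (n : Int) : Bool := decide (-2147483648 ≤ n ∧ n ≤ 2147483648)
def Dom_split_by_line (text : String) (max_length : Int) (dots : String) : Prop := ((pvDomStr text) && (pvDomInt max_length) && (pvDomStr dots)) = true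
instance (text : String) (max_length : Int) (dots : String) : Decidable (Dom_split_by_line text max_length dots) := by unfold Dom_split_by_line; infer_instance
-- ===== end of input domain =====

-- B finds the truncation point by binary search over the prefix sums of line lengths instead of A's cumulative scan-with-break; objective: alternative algorithm, same overall cost.


-- ===== PORT A =====
-- the 'for line in lines' loop with its accumulator ss, running length_count and break
def pvALoop (lines : List String) (length_count max_length : Int) (dots : String) : List String :=
  match lines with
  | [] => []
  | line :: rest =>
    if length_count + PySem.Str.len line > max_length then [dots]
    else line :: pvALoop rest (length_count + PySem.Str.len line) max_length dots

def split_by_line (text : String) (max_length : Int) (dots : String) : String :=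
  let lines := (PySem.Str.split? text "\n").getD []   -- sep "\n" ≠ "", so split? is always some
  let ss := pvALoop lines 0 max_length dots
  PySem.Str.join "\n" (ss ++ PySem.List.slice lines (some (-1)) none)

-- ===== PORT B =====
-- stage 1 of Source B: the prefix-sum loop ('total += len(line); cums.append(total)')
def pvCums (lines : List String) (total : Int) : List Int :=
  match lines with
  | [] => []
  | line :: rest => (total + PySem.Str.len line) :: pvCums rest (total + PySem.Str.len line)

-- stage 2 of Source B: the 'while lo < hi' binary search; cums[mid] is always in range
-- (mid < hi ≤ len(cums)), so the index is ported as getD mid 0 — exact on every reachable call.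
def pvBsearch (cums : List Int) (max_length : Int) (lo hi : Nat) : Nat :=
  if lo < hi then
    -- mid = (lo + hi) // 2, inlined at its two uses
    if cums.getD ((lo + hi) / 2) 0 > max_length then pvBsearch cums max_length lo ((lo + hi) / 2)
    else pvBsearch cums max_length ((lo + hi) / 2 + 1) hi
  else lo
termination_by hi - lo
decreasing_by all_goals omega

def split_by_line_alt (text : String) (max_length : Int) (dots : String) : String :=
  let lines := (PySem.Str.split? text "\n").getD []   -- sep "\n" ≠ "", so split? is always some
  let cums := pvCums lines 0
  let lo := pvBsearch cums max_length 0 lines.length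
  let body := if lo = lines.length then lines
              else PySem.List.slice lines none (some (lo : Int)) ++ [dots]
  PySem.Str.join "\n" (body ++ PySem.List.slice lines (some (-1)) none)

-- ===== PRECONDITION & SPEC =====
def Spec_split_by_line (text : String) (max_length : Int) (dots : String) (out : String) : Prop := out = split_by_line_alt text max_length dots
instance (text : String) (max_length : Int) (dots : String) (out : String) : Decidable (Spec_split_by_line text max_length dots out) := by unfold Spec_split_by_line; infer_instance

-- ===== CLAIM (what is proved, stated in full; the proofs are below) =====
def Claim_equal_split_by_line : Prop := ∀ (text : String) (max_length : Int) (dots : String), Dom_split_by_line text max_length dots → Spec_split_by_line text max_length dots (split_by_line text max_length dots)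

-- ===== LEMMAS AND PROOFS =====

theorem pvCums_length (lines : List String) (t : Int) : (pvCums lines t).length = lines.length := by
  induction lines generalizing t with
  | nil => rfl
  | cons l r ih => simp [pvCums, ih]

theorem pvCums_ge (lines : List String) (t : Int) :
    ∀ i < lines.length, t ≤ (pvCums lines t).getD i 0 := by
  induction lines generalizing t with
  | nil => intro i h; simp at h
  | cons l r ih =>
    intro i h
    have hL : PySem.Str.len l = (l.length : Int) := by simp
    cases i with
    | zero => simp [pvCums]
    | succ k =>
      have hk := ih (t + PySem.Str.len l) k (by simpa using Nat.lt_of_succ_lt_succ h)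
      simp [pvCums] at hk ⊢
      omega

theorem pvCums_mono (lines : List String) (t : Int) :
    ∀ i j, i ≤ j → j < lines.length →
      (pvCums lines t).getD i 0 ≤ (pvCums lines t).getD j 0 := by
  induction lines generalizing t with
  | nil => intro i j _ h; simp at h
  | cons l r ih =>
    intro i j hij hj
    cases i with
    | zero =>
      cases j with
      | zero => exact le_rfl
      | succ k =>
        have hk := pvCums_ge r (t + PySem.Str.len l) k (by simpa using Nat.lt_of_succ_lt_succ hj)
        simp [pvCums] at hk ⊢
        omega
    | succ i' =>
      cases j with
      | zero => omega
      | succ k =>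
        have hk := ih (t + PySem.Str.len l) i' k (by omega) (by simpa using Nat.lt_of_succ_lt_succ hj)
        simp [pvCums] at hk ⊢
        omega

-- A's break index (proof helper): the first index at which the running total exceeds the budget
def pvBreakIndex (lines : List String) (budget : Int) : Option Nat :=
  match lines with
  | [] => none
  | line :: rest =>
    if budget - PySem.Str.len line < 0 then some 0
    else (pvBreakIndex rest (budget - PySem.Str.len line)).map (· + 1)

-- A's loop equals "lines truncated at the break index"
theorem pvALoop_eq (lines : List String) (cnt max_length : Int) (dots : String) :
    pvALoop lines cnt max_length dots =
      match pvBreakIndex lines (max_length - cnt) with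
      | none => lines
      | some brk => lines.take brk ++ [dots] := by
  induction lines generalizing cnt with
  | nil => simp [pvALoop, pvBreakIndex]
  | cons line rest ih =>
    rw [pvALoop, pvBreakIndex]
    by_cases h : cnt + PySem.Str.len line > max_length
    · rw [if_pos h, if_pos (by omega)]; simp
    · rw [if_neg h, if_neg (by omega), ih]
      have e : max_length - cnt - PySem.Str.len line = max_length - (cnt + PySem.Str.len line) := by ring
      rw [e]
      cases hb : pvBreakIndex rest (max_length - (cnt + PySem.Str.len line)) with
      | none => simp
      | some i => simp

-- The break index in terms of the prefix sums
theorem pvBreakIndex_spec (lines : List String) (t m : Int) :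
    (pvBreakIndex lines (m - t) = none → ∀ i < lines.length, (pvCums lines t).getD i 0 ≤ m) ∧
    (∀ r, pvBreakIndex lines (m - t) = some r →
      r < lines.length ∧ (∀ i < r, (pvCums lines t).getD i 0 ≤ m) ∧ m < (pvCums lines t).getD r 0) := by
  induction lines generalizing t with
  | nil => constructor <;> simp [pvBreakIndex]
  | cons l rest ih =>
    have hL : PySem.Str.len l = (l.length : Int) := by simp
    have e : m - t - (l.length : Int) = m - (t + PySem.Str.len l) := by omega
    by_cases h : m - t - PySem.Str.len l < 0
    · constructor
      · intro hn; rw [pvBreakIndex, if_pos h] at hn; exact absurd hn (by simp)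
      · intro r hr; rw [pvBreakIndex, if_pos h] at hr
        simp at hr; subst hr
        refine ⟨by simp, by omega, ?_⟩
        simp [pvCums]; omega
    · obtain ⟨ihn, ihs⟩ := ih (t + PySem.Str.len l)
      constructor
      · intro hn; rw [pvBreakIndex, if_neg h] at hn
        simp [e] at hn
        intro i hi
        cases i with
        | zero => simp [pvCums]; omega
        | succ k =>
          have hk := ihn hn k (by simpa using Nat.lt_of_succ_lt_succ hi)
          simp [pvCums] at hk ⊢; omega
      · intro r hr; rw [pvBreakIndex, if_neg h] at hr
        simp [e] at hr
        obtain ⟨r', hr', hrr⟩ := hr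
        obtain ⟨h1, h2, h3⟩ := ihs r' hr'
        subst hrr
        refine ⟨by simpa using Nat.succ_lt_succ h1, ?_, by simp [pvCums] at h3 ⊢; omega⟩
        intro i hi
        cases i with
        | zero => simp [pvCums]; omega
        | succ k =>
          have hk := h2 k (by omega)
          simp [pvCums] at hk ⊢; omega

-- Correctness of the binary search (by its own recursion)
theorem pvBsearch_correct (cums : List Int) (m : Int) (lo hi : Nat) :
    hi ≤ cums.length → lo ≤ hi →
    (∀ i < lo, cums.getD i 0 ≤ m) →
    (∀ i, hi ≤ i → i < cums.length → m < cums.getD i 0) →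
    (∀ i j, i ≤ j → j < cums.length → cums.getD i 0 ≤ cums.getD j 0) →
    (∀ i < pvBsearch cums m lo hi, cums.getD i 0 ≤ m) ∧
    pvBsearch cums m lo hi ≤ cums.length ∧
    (∀ i, pvBsearch cums m lo hi ≤ i → i < cums.length → m < cums.getD i 0) := by
  fun_induction pvBsearch cums m lo hi with
  | case1 lo hi h hmid ih =>
    intro hhi hlh hlo hup mono
    refine ih (by omega) (by omega) hlo ?_ mono
    intro i hge hlt
    exact lt_of_lt_of_le hmid (mono ((lo + hi) / 2) i (by omega) hlt)
  | case2 lo hi h hmid ih =>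
    intro hhi hlh hlo hup mono
    refine ih hhi (by omega) ?_ hup mono
    intro i hi'
    rcases Nat.lt_or_ge i lo with h' | h'
    · exact hlo i h'
    · -- lo ≤ i ≤ mid: cums[i] ≤ cums[mid] ≤ m by monotonicity
      have hle := mono i ((lo + hi) / 2) (by omega) (by omega)
      omega
  | case3 lo hi h =>
    intro hhi hlh hlo hup mono
    exact ⟨hlo, by omega, fun i hle hlt => hup i (by omega) hlt⟩

-- Both break-point computations satisfy the same first-exceeding-index property, hence agree
theorem bsearch_eq_break (lines : List String) (m : Int) :
    (match pvBreakIndex lines m with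
      | none => lines.length
      | some r => r) = pvBsearch (pvCums lines 0) m 0 lines.length := by
  have hlen := pvCums_length lines 0
  obtain ⟨hB1, hB2, hB3⟩ :=
    pvBsearch_correct (pvCums lines 0) m 0 lines.length (by omega) (by omega)
      (by intro i hi; omega)
      (by intro i hge hlt; rw [hlen] at hlt; omega)
      (by intro i j hij hj; rw [hlen] at hj; exact pvCums_mono lines 0 i j hij hj)
  obtain ⟨hn, hs⟩ := pvBreakIndex_spec lines 0 m
  rw [sub_zero] at hn hs
  cases hbk : pvBreakIndex lines m with
  | none =>
    show lines.length = pvBsearch (pvCums lines 0) m 0 lines.length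
    have hall := hn hbk
    by_contra hne
    have hlt : pvBsearch (pvCums lines 0) m 0 lines.length < lines.length := by
      rw [hlen] at hB2; omega
    have h1 := hB3 _ (le_refl _) (by omega)
    have h2 := hall _ hlt
    omega
  | some r =>
    show r = pvBsearch (pvCums lines 0) m 0 lines.length
    obtain ⟨h1, h2, h3⟩ := hs r hbk
    by_contra hne
    rcases Nat.lt_or_ge r (pvBsearch (pvCums lines 0) m 0 lines.length) with h' | h'
    · have := hB1 r h'; omega
    · have hr' : pvBsearch (pvCums lines 0) m 0 lines.length < r := by omega
      have ha := h2 _ hr'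
      have hb := hB3 _ (le_refl _) (by omega)
      omega

theorem bsearch_none (lines : List String) (m : Int) (h : pvBreakIndex lines m = none) :
    pvBsearch (pvCums lines 0) m 0 lines.length = lines.length := by
  have h2 := bsearch_eq_break lines m
  rw [h] at h2
  exact h2.symm

theorem bsearch_some (lines : List String) (m : Int) (r : Nat) (h : pvBreakIndex lines m = some r) :
    pvBsearch (pvCums lines 0) m 0 lines.length = r := by
  have h2 := bsearch_eq_break lines m
  rw [h] at h2
  exact h2.symm

-- ===== VERDICT (by name: the statement is the Claim_ definition above) =====
theorem split_by_line_spec : Claim_equal_split_by_line := by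
  intro text max_length dots _
  unfold Spec_split_by_line split_by_line split_by_line_alt
  simp only [pvALoop_eq, sub_zero, PySem.List.slice_to_natCast]
  cases hbk : pvBreakIndex ((PySem.Str.split? text "\n").getD []) max_length with
  | none => rw [bsearch_none _ _ hbk]; simp
  | some r =>
    have hlt : r < ((PySem.Str.split? text "\n").getD []).length :=
      ((pvBreakIndex_spec ((PySem.Str.split? text "\n").getD []) 0 max_length).2 r
        (by rwa [sub_zero]) ).1
    rw [bsearch_some _ _ _ hbk, if_neg (by omega)]
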